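-- pv_equiv track=rewrite | github.com/cedadev/nlds-admin | nlds_admin/prints.py | integer_permissions_to_string
-- ===== SOURCE A (Python) =====
-- def integer_permissions_to_string(intperm):
--     octal = oct(intperm)[2:]
--     result = ""
--     value_letters = [(4, "r"), (2, "w"), (1, "x")]
--     # Iterate over each of the digits in octal
--     for digit in [int(n) for n in str(octal)]:
--         # Check for each of the permissions values
--         for value, letter in value_letters:
--             if digit >= value:
--                 result += letter
--                 digit -= value
--             else:
--                 result += "-"
--     return result
-- ===== SOURCE B (Python) =====
-- _RWX = ["---", "--x", "-w-", "-wx", "r--", "r-x", "rw-", "rwx"]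
--
-- def integer_permissions_to_string(intperm):
--     return "".join(_RWX[int(d)] for d in oct(intperm)[2:])
-- ===== Notes on version B (the rewrite author's own statement) =====
-- stated objective: simpler
-- what changed: Replaces the nested loop with running subtraction over (value, letter) pairs by a fixed per-octal-digit lookup table of rwx fragments joined over the octal digits in one pass.
-- outside the precondition, e.g. on integer_permissions_to_string(-1): A raises ValueError, B raises ValueError
import Mathlib
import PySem

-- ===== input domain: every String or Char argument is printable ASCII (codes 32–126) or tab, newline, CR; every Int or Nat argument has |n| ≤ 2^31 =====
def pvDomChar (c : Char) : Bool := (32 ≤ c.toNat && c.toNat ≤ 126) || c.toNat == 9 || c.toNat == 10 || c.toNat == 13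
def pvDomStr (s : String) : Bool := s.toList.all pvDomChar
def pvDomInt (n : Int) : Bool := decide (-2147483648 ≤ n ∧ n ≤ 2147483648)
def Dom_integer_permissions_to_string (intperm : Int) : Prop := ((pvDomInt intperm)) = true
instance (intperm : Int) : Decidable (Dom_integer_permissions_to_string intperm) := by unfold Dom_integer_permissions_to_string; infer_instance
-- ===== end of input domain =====

-- B replaces A's inner per-digit loop with running subtraction by a fixed per-digit
-- octal-digit -> rwx-fragment table joined over the octal digits (objective: simpler).


-- shared helper: Python's oct() builtin (both A and B call it).
-- octal digit characters of n, most significant first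
def pvOctDigitsNat (n : Nat) : List Char :=
  if _h : n < 8 then [Nat.digitChar n]
  else pvOctDigitsNat (n / 8) ++ [Nat.digitChar (n % 8)]
  termination_by n
  decreasing_by exact Nat.div_lt_self (by omega) (by omega)

-- oct(n): "0oXYZ", or "-0oXYZ" for negative n
def pvPyOct (n : Int) : String :=
  if n < 0 then String.ofList ('-' :: '0' :: 'o' :: pvOctDigitsNat n.natAbs)
  else String.ofList ('0' :: 'o' :: pvOctDigitsNat n.toNat)

-- ===== PORT A =====
def integer_permissions_to_string (intperm : Int) : String :=
  -- octal = oct(intperm)[2:]  ([2:] on a string = drop 2 code points; exact, Python clamps the same way)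
  let octal : List Char := (pvPyOct intperm).toList.drop 2
  -- digits = [int(n) for n in str(octal)]; int('o') raises ValueError (ofStr? = none) exactly when
  -- intperm < 0, which Pre_ excludes; the .getD 0 default is only reached outside Pre_.
  let digits : List Int := octal.map (fun c => (PySem.Int.ofStr? (String.singleton c)).getD 0)
  let value_letters : List (Int × String) := [(4, "r"), (2, "w"), (1, "x")]
  digits.foldl (fun result digit =>
    (value_letters.foldl (fun (st : String × Int) vl =>
        if st.2 ≥ vl.1 then (st.1 ++ vl.2, st.2 - vl.1) else (st.1 ++ "-", st.2))
      (result, digit)).1) ""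

-- ===== PORT B =====
def pvRWX : List String := ["---", "--x", "-w-", "-wx", "r--", "r-x", "rw-", "rwx"]

def integer_permissions_to_string_alt (intperm : Int) : String :=
  -- "".join(_RWX[int(d)] for d in oct(intperm)[2:]); as in A, the .getD defaults are
  -- only reached where the Python raises (intperm < 0, excluded by Pre_).
  String.join (((pvPyOct intperm).toList.drop 2).map
    (fun d => (PySem.List.pyGet? pvRWX ((PySem.Int.ofStr? (String.singleton d)).getD 0)).getD ""))

-- ===== PRECONDITION & SPEC =====
-- Pre_ excludes negative intperm, where both A and B raise ValueError (int('o') on the '-0o…' prefix).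
def Pre_integer_permissions_to_string (intperm : Int) : Prop := 0 ≤ intperm
instance (intperm : Int) : Decidable (Pre_integer_permissions_to_string intperm) := by unfold Pre_integer_permissions_to_string; infer_instance
def pvWitness_integer_permissions_to_string : Int := 493

def Spec_integer_permissions_to_string (intperm : Int) (out : String) : Prop := out = integer_permissions_to_string_alt intperm
instance (intperm : Int) (out : String) : Decidable (Spec_integer_permissions_to_string intperm out) := by unfold Spec_integer_permissions_to_string; infer_instance

-- ===== CLAIM (what is proved, stated in full; the proofs are below) =====
def Claim_equal_integer_permissions_to_string : Prop := ∀ (intperm : Int), Dom_integer_permissions_to_string intperm → Pre_integer_permissions_to_string intperm → Spec_integer_permissions_to_string intperm (integer_permissions_to_string intperm)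

-- ===== LEMMAS AND PROOFS =====

-- every character oct() produces is an octal digit character
lemma pvOctDigitsNat_mem (n : Nat) : ∀ c ∈ pvOctDigitsNat n, ∃ k, k < 8 ∧ c = Nat.digitChar k := by
  induction n using Nat.strong_induction_on with
  | _ n ih =>
    intro c hc
    unfold pvOctDigitsNat at hc
    split at hc
    · simp at hc; exact ⟨n, by omega, hc⟩
    · rename_i h
      simp at hc
      rcases hc with hc | hc
      · exact ih (n / 8) (Nat.div_lt_self (by omega) (by omega)) c hc
      · exact ⟨n % 8, Nat.mod_lt _ (by omega), hc⟩

-- int(str(digitChar k)) = k for octal digits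
lemma pvOfStr_digitChar (k : Nat) (hk : k < 8) :
    PySem.Int.ofStr? (String.singleton (Nat.digitChar k)) = some (k : Int) := by
  interval_cases k <;> decide

-- the inner value_letters loop on digit d equals the table entry for d
lemma pvInner_eq (res : String) (d : Int) (h0 : 0 ≤ d) (h8 : d < 8) :
    (([(4, "r"), (2, "w"), (1, "x")] : List (Int × String)).foldl
        (fun (st : String × Int) vl =>
          if st.2 ≥ vl.1 then (st.1 ++ vl.2, st.2 - vl.1) else (st.1 ++ "-", st.2))
        (res, d)).1
      = res ++ (PySem.List.pyGet? pvRWX d).getD "" := by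
  interval_cases d <;>
    simp [pvRWX, PySem.List.pyGet?, PySem.List.pyIdx?, List.foldl, String.append_assoc]

-- pulling a prefix out of the join fold
lemma pvFoldlAppend (l : List String) : ∀ (a b : String),
    l.foldl (fun r s => r ++ s) (a ++ b) = a ++ l.foldl (fun r s => r ++ s) b := by
  induction l with
  | nil => intro a b; simp
  | cons x l ih => intro a b; rw [List.foldl_cons, List.foldl_cons, String.append_assoc, ih]

-- String.join peels off the head
lemma pvJoin_cons (s : String) (l : List String) : String.join (s :: l) = s ++ String.join l := by
  unfold String.join
  rw [List.foldl_cons]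
  have h1 : ("" : String) ++ s = s := String.empty_append
  rw [h1]
  conv_lhs => rw [show s = s ++ "" from String.append_empty.symm]
  rw [pvFoldlAppend l s ""]

-- the outer loop is the join of the table entries
lemma pvOuter_eq (L : List Char) (hL : ∀ c ∈ L, ∃ k, k < 8 ∧ c = Nat.digitChar k) (acc : String) :
    (L.map (fun c => (PySem.Int.ofStr? (String.singleton c)).getD 0)).foldl
        (fun result digit =>
          (([(4, "r"), (2, "w"), (1, "x")] : List (Int × String)).foldl
              (fun (st : String × Int) vl =>
                if st.2 ≥ vl.1 then (st.1 ++ vl.2, st.2 - vl.1) else (st.1 ++ "-", st.2))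
            (result, digit)).1) acc
      = acc ++ String.join (L.map
          (fun d => (PySem.List.pyGet? pvRWX ((PySem.Int.ofStr? (String.singleton d)).getD 0)).getD "")) := by
  induction L generalizing acc with
  | nil => simp [String.join]
  | cons c L ih =>
    obtain ⟨k, hk, hc⟩ := hL c (by simp)
    have hd : (PySem.Int.ofStr? (String.singleton c)).getD 0 = (k : Int) := by
      rw [hc, pvOfStr_digitChar k hk]; rfl
    rw [List.map_cons, List.foldl_cons,
      pvInner_eq acc ((PySem.Int.ofStr? (String.singleton c)).getD 0)
        (by rw [hd]; exact Int.natCast_nonneg k) (by rw [hd]; exact_mod_cast hk),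
      ih (fun c hcm => hL c (by simp [hcm])),
      List.map_cons, pvJoin_cons, String.append_assoc]

-- ===== VERDICT (by name: the statement is the Claim_ definition above) =====
theorem integer_permissions_to_string_spec : Claim_equal_integer_permissions_to_string := by
  intro intperm _ hpre
  unfold Pre_integer_permissions_to_string at hpre
  unfold Spec_integer_permissions_to_string integer_permissions_to_string integer_permissions_to_string_alt
  have hoct : (pvPyOct intperm).toList.drop 2 = pvOctDigitsNat intperm.toNat := by
    unfold pvPyOct
    rw [if_neg (by omega)]
    simp
  rw [hoct]
  rw [pvOuter_eq _ (pvOctDigitsNat_mem intperm.toNat) ""]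
  exact String.empty_append
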